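-- pv_equiv track=rewrite | github.com/FlorianWi89/Streamlit_App | utils.py | getCombinedMomentumSignals
-- ===== SOURCE A (Python) =====
-- def getCombinedMomentumSignals(macd_signal,rsi,mom,stoch, length):
--     signals = []
--     for idx in range(2,length,5):
--         v = [x for x in range(idx - 2, idx + 3)] #create window
--         a = len(list(set(v).intersection(set(macd_signal))))
--         b = len(list(set(v).intersection(set(rsi))))
--         c = len(list(set(v).intersection(set(mom))))
--         d = len(list(set(v).intersection(set(stoch))))
--
--         if (a+b+c+d) > 2:
--             signals.append(max(v))
--     return signals
-- ===== SOURCE B (Python) =====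
-- def getCombinedMomentumSignals(macd_signal, rsi, mom, stoch, length):
--     # Scatter distinct values into 5-wide buckets instead of intersecting sets per window.
--     idxs = list(range(2, length, 5))
--     if not idxs:
--         return []
--     hi = idxs[-1] + 2
--     counts = {}
--     for lst in (macd_signal, rsi, mom, stoch):
--         for x in set(lst):
--             if 0 <= x <= hi:
--                 k = x // 5
--                 counts[k] = counts.get(k, 0) + 1
--     return [idx + 2 for idx in idxs if counts.get(idx // 5, 0) > 2]
-- ===== Notes on version B (the rewrite author's own statement) =====
-- stated objective: faster
-- what changed: Instead of scanning each 5-wide window and intersecting it with four freshly built sets, B scatters the distinct in-range values of the four lists once into 5-wide buckets keyed by x//5 and then emits idx+2 for every window whose bucket count exceeds 2.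
import Mathlib
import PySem

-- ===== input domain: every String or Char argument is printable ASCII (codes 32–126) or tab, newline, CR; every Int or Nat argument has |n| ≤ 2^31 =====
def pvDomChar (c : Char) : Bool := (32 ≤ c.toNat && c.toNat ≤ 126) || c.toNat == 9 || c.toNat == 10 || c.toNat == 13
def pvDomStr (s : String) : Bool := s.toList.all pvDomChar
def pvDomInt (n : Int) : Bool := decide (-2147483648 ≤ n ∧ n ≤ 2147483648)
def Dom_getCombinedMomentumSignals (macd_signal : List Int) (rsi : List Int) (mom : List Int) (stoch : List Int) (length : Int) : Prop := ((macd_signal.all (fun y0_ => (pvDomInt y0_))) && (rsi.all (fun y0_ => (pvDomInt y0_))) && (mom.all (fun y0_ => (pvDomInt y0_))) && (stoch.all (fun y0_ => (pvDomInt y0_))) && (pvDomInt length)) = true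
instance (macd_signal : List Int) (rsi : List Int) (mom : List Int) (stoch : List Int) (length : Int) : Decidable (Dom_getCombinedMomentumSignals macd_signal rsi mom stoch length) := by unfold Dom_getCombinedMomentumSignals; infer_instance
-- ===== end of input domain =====

-- ===== PORT A =====
-- B replaces per-window set intersections with a single scatter of distinct values into 5-wide buckets (faster: one pass over the lists instead of one per window).
def getCombinedMomentumSignals (macd_signal : List Int) (rsi : List Int) (mom : List Int) (stoch : List Int) (length : Int) : List Int :=
  (PySem.List.pyRange 2 length 5).foldl (fun signals idx =>
    let v := PySem.List.pyRange (idx - 2) (idx + 3) 1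
    let a := PySem.Set.len (PySem.Set.inter (PySem.Set.ofList v) (PySem.Set.ofList macd_signal))
    let b := PySem.Set.len (PySem.Set.inter (PySem.Set.ofList v) (PySem.Set.ofList rsi))
    let c := PySem.Set.len (PySem.Set.inter (PySem.Set.ofList v) (PySem.Set.ofList mom))
    let d := PySem.Set.len (PySem.Set.inter (PySem.Set.ofList v) (PySem.Set.ofList stoch))
    -- max(v): v is always a nonempty 5-element range, total form via max?/getD
    if a + b + c + d > 2 then signals ++ [(PySem.List.max? v (fun y => y)).getD 0] else signals) []

-- ===== PORT B =====
def getCombinedMomentumSignals_alt (macd_signal : List Int) (rsi : List Int) (mom : List Int) (stoch : List Int) (length : Int) : List Int :=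
  let idxs := PySem.List.pyRange 2 length 5
  if idxs = [] then []
  else
    let hi := PySem.List.pyGetD idxs (-1) 0 + 2
    let counts : PySem.Dict Int Int :=
      [macd_signal, rsi, mom, stoch].foldl (fun d lst =>
        (PySem.Set.ofList lst).foldl (fun d x =>
          if 0 ≤ x ∧ x ≤ hi then d.modify (PySem.Int.floordiv x 5) 0 (· + 1) else d) d)
        PySem.Dict.empty
    idxs.foldl (fun out idx =>
      if counts.getD (PySem.Int.floordiv idx 5) 0 > 2 then out ++ [idx + 2] else out) []

-- ===== PRECONDITION & SPEC =====
def Spec_getCombinedMomentumSignals (macd_signal : List Int) (rsi : List Int) (mom : List Int) (stoch : List Int) (length : Int) (out : List Int) : Prop := out = getCombinedMomentumSignals_alt macd_signal rsi mom stoch length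
instance (macd_signal : List Int) (rsi : List Int) (mom : List Int) (stoch : List Int) (length : Int) (out : List Int) : Decidable (Spec_getCombinedMomentumSignals macd_signal rsi mom stoch length out) := by unfold Spec_getCombinedMomentumSignals; infer_instance

-- ===== CLAIM (what is proved, stated in full; the proofs are below) =====
def Claim_equal_getCombinedMomentumSignals : Prop := ∀ (macd_signal : List Int) (rsi : List Int) (mom : List Int) (stoch : List Int) (length : Int), Dom_getCombinedMomentumSignals macd_signal rsi mom stoch length → Spec_getCombinedMomentumSignals macd_signal rsi mom stoch length (getCombinedMomentumSignals macd_signal rsi mom stoch length)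

-- ===== LEMMAS AND PROOFS =====

-- B's guarded scatter loop over one list, read back at key j: it adds the number of
-- in-range elements whose bucket x // 5 is j.
theorem pv_getD_scatter (l : List Int) (d : PySem.Dict Int Int) (hi j : Int) :
    (l.foldl (fun d x =>
        if 0 ≤ x ∧ x ≤ hi then d.modify (PySem.Int.floordiv x 5) 0 (· + 1) else d) d).getD j 0
      = d.getD j 0
        + (l.countP (fun x => decide (0 ≤ x ∧ x ≤ hi) && (PySem.Int.floordiv x 5 == j)) : Int) := by
  induction l generalizing d with
  | nil => simp
  | cons x t ih =>
    simp only [List.foldl_cons, List.countP_cons]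
    by_cases hx : 0 ≤ x ∧ x ≤ hi
    · rw [if_pos hx, ih, PySem.Dict.getD_modify]
      by_cases hj : j = PySem.Int.floordiv x 5
      · have hb : (decide (0 ≤ x ∧ x ≤ hi) && (PySem.Int.floordiv x 5 == j)) = true := by
          simp [hx, hj]
        rw [hb, if_pos hj, hj, if_pos rfl]
        push_cast
        ring
      · have hb : (decide (0 ≤ x ∧ x ≤ hi) && (PySem.Int.floordiv x 5 == j)) = false := by
          rw [beq_eq_false_iff_ne.mpr (fun hc => hj hc.symm)]
          simp
        rw [hb, if_neg hj]
        simp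
    · rw [if_neg hx, ih]
      have hb : (decide (0 ≤ x ∧ x ≤ hi) && (PySem.Int.floordiv x 5 == j)) = false := by
        simp [hx]
      rw [hb]
      simp


-- Per window and per list: A's |set(window) ∩ set(L)| equals B's count of distinct
-- in-range elements of L falling in bucket idx // 5.
theorem pv_cnt_eq (L : List Int) (idx last : Int)
    (h2 : 2 ≤ idx) (hdvd : (5:Int) ∣ idx - 2) (hle : idx ≤ last) :
    PySem.Set.len (PySem.Set.inter
        (PySem.Set.ofList (PySem.List.pyRange (idx - 2) (idx + 3) 1)) (PySem.Set.ofList L))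
      = ((PySem.Set.ofList L).countP (fun x =>
          decide (0 ≤ x ∧ x ≤ last + 2) && (PySem.Int.floordiv x 5 == PySem.Int.floordiv idx 5)) : Int) := by
  obtain ⟨k, hk⟩ := hdvd
  have hfidx : PySem.Int.floordiv idx 5 = k := by
    rw [PySem.Int.floordiv_eq_iff_of_pos (by omega)]; omega
  rw [PySem.Set.ofList_eq_self_of_nodup _ (PySem.List.nodup_pyRange_one _ _)]
  rw [List.countP_eq_length_filter]
  unfold PySem.Set.len PySem.Set.inter
  have hperm : ((PySem.List.pyRange (idx - 2) (idx + 3) 1).filter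
        (fun x => (PySem.Set.ofList L).contains x)).Perm
      ((PySem.Set.ofList L).filter (fun x =>
          decide (0 ≤ x ∧ x ≤ last + 2) && (PySem.Int.floordiv x 5 == PySem.Int.floordiv idx 5))) := by
    rw [List.perm_ext_iff_of_nodup
      ((PySem.List.nodup_pyRange_one _ _).filter _)
      ((PySem.Set.nodup_ofList L).filter _)]
    intro x
    simp only [List.mem_filter, PySem.List.mem_pyRange_one, PySem.Set.contains_iff,
      PySem.Set.mem_ofList, Bool.and_eq_true, decide_eq_true_eq, beq_iff_eq, hfidx]
    constructor
    · rintro ⟨⟨hlo, hhi⟩, hmem⟩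
      refine ⟨hmem, ⟨by omega, by omega⟩, ?_⟩
      rw [PySem.Int.floordiv_eq_iff_of_pos (by omega)]; omega
    · rintro ⟨hmem, ⟨hlo, hhi⟩, hf⟩
      rw [PySem.Int.floordiv_eq_iff_of_pos (by omega)] at hf
      exact ⟨⟨by omega, by omega⟩, hmem⟩
  rw [hperm.length_eq]

-- max(v) for the window v = range(idx-2, idx+3) is idx + 2.
theorem pv_max_window (idx : Int) :
    (PySem.List.max? (PySem.List.pyRange (idx - 2) (idx + 3) 1) (fun y => y)).getD 0 = idx + 2 := by
  have hv : PySem.List.pyRange (idx - 2) (idx + 3) 1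
      = [idx - 2, idx - 1, idx, idx + 1, idx + 2] := by
    rw [PySem.List.pyRange_one]
    have h5 : (idx + 3 - (idx - 2)).toNat = 5 := by omega
    rw [h5]
    simp [List.range_succ]
    omega
  rw [hv, PySem.List.max?_id_cons]
  simp only [List.foldl_cons, List.foldl_nil, Option.getD_some]
  omega

-- every member of range(2, length, 5) is at most its last element
theorem pv_le_last (length idx : Int) (h : idx ∈ PySem.List.pyRange 2 length 5) :
    idx ≤ PySem.List.pyGetD (PySem.List.pyRange 2 length 5) (-1) 0 := by
  rw [PySem.List.pyRange_of_pos 2 length (by omega)] at h ⊢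
  set n := (if (2:Int) < length then ((length - 2 + 5 - 1) / 5).toNat else 0) with hn
  obtain ⟨k, hkmem, hkeq⟩ := List.mem_map.mp h
  rw [List.mem_range] at hkmem
  have hne : (List.range n).map (fun k : Nat => (2:Int) + 5 * (k:Int)) ≠ [] := by
    simp
    omega
  rw [PySem.List.pyGetD_neg_one _ _ hne, List.getLast_eq_getElem]
  simp only [List.getElem_map, List.length_map, List.length_range, List.getElem_range]
  omega


-- ===== VERDICT (by name: the statement is the Claim_ definition above) =====
theorem getCombinedMomentumSignals_spec : Claim_equal_getCombinedMomentumSignals := by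
  intro macd_signal rsi mom stoch length _
  unfold Spec_getCombinedMomentumSignals
  unfold getCombinedMomentumSignals getCombinedMomentumSignals_alt
  simp only []
  by_cases hnil : PySem.List.pyRange 2 length 5 = []
  · rw [if_pos hnil, hnil, List.foldl_nil]
  · rw [if_neg hnil]
    apply PySem.List.foldl_congr_mem
    intro acc idx hmem
    have hprops := (PySem.List.mem_pyRange_iff_of_pos (by omega) idx).mp hmem
    obtain ⟨h2, hlt, hdvd⟩ := hprops
    have hle := pv_le_last length idx hmem
    set last := PySem.List.pyGetD (PySem.List.pyRange 2 length 5) (-1) 0 with hlastdef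
    have hcond :
        (PySem.Set.len (PySem.Set.inter (PySem.Set.ofList (PySem.List.pyRange (idx - 2) (idx + 3) 1)) (PySem.Set.ofList macd_signal))
         + PySem.Set.len (PySem.Set.inter (PySem.Set.ofList (PySem.List.pyRange (idx - 2) (idx + 3) 1)) (PySem.Set.ofList rsi))
         + PySem.Set.len (PySem.Set.inter (PySem.Set.ofList (PySem.List.pyRange (idx - 2) (idx + 3) 1)) (PySem.Set.ofList mom))
         + PySem.Set.len (PySem.Set.inter (PySem.Set.ofList (PySem.List.pyRange (idx - 2) (idx + 3) 1)) (PySem.Set.ofList stoch)) > 2)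
        ↔ ((([macd_signal, rsi, mom, stoch].foldl (fun d lst =>
              (PySem.Set.ofList lst).foldl (fun d x =>
                if 0 ≤ x ∧ x ≤ last + 2 then d.modify (PySem.Int.floordiv x 5) 0 (· + 1) else d) d)
              PySem.Dict.empty : PySem.Dict Int Int)).getD (PySem.Int.floordiv idx 5) 0 > 2) := by
      rw [pv_cnt_eq macd_signal idx last h2 hdvd hle,
          pv_cnt_eq rsi idx last h2 hdvd hle,
          pv_cnt_eq mom idx last h2 hdvd hle,
          pv_cnt_eq stoch idx last h2 hdvd hle]
      simp only [List.foldl_cons, List.foldl_nil]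
      rw [pv_getD_scatter, pv_getD_scatter, pv_getD_scatter, pv_getD_scatter]
      simp only [PySem.Dict.getD_empty]
      omega
    rw [pv_max_window idx]
    simp only [hcond]
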